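-- pv_equiv track=rewrite | github.com/valentinboyanov/programming_exercises | programming_practice_problems/solutions/easy_problems_05.py | to_candidates
-- ===== SOURCE A (Python) =====
-- from typing import Any, Dict, List
--
-- def to_candidates(votes: List[Dict]) -> Dict[str, int]:
--     candidates: Dict[str, int] = {}
--
--     for vote in votes:
--         for key in vote.keys():
--             if key != "Precinct":
--                 if key in candidates.keys():
--                     candidates[key] = candidates[key] + int(vote[key])
--                 else:
--                     candidates[key] = int(vote[key])
--
--     return candidates
-- ===== SOURCE B (Python) =====
-- from typing import Dict, List
--
-- def to_candidates(votes: List[Dict]) -> Dict[str, int]: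
--     # column-major: collect candidate keys first, then sum each candidate's column
--     keys = dict.fromkeys(k for vote in votes for k in vote if k != "Precinct")
--     return {k: sum(int(vote[k]) for vote in votes if k in vote) for k in keys}
-- ===== Notes on version B (the rewrite author's own statement) =====
-- stated objective: alternative
-- what changed: Row-major accumulation into a growing dict (per precinct, per key, with a membership test and in-place update) is replaced by a column-major pass: first dedupe the candidate keys, then for each candidate sum int(vote[key]) over exactly the votes containing that key.
import Mathlib
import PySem

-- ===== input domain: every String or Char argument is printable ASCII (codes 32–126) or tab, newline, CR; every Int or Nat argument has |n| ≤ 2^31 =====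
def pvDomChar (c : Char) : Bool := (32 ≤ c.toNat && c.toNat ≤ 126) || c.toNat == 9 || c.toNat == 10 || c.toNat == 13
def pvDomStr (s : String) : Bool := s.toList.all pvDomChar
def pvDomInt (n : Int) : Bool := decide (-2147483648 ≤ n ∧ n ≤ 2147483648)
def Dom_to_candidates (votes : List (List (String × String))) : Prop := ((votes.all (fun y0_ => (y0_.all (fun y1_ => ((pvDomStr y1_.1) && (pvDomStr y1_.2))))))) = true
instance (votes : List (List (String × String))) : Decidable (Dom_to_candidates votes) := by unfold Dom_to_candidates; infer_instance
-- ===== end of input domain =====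

-- B replaces A's row-major accumulation into a growing dict by a column-major pass:
-- dedupe the candidate keys once, then sum each candidate's column (objective: alternative).
-- Each Python vote dict is the association list normalised by PySem.Dict.ofList.

-- int(s); total here, used only where Pre_ guarantees ofStr? is some
def pvIntOf (s : String) : Int := (PySem.Int.ofStr? s).getD 0

-- ===== PORT A =====
def to_candidates (votes : List (List (String × String))) : List (String × Int) :=
  (votes.foldl (fun candidates vote =>
      let d := PySem.Dict.ofList vote
      d.keys.foldl (fun candidates key =>
        if key ≠ "Precinct" then
          if candidates.contains key then
            candidates.insert key (candidates.getD key 0 + pvIntOf (d.getD key ""))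
          else
            candidates.insert key (pvIntOf (d.getD key ""))
        else candidates) candidates)
    PySem.Dict.empty).items

-- ===== PORT B =====
def to_candidates_alt (votes : List (List (String × String))) : List (String × Int) :=
  let keys := PySem.List.dedup
    ((votes.flatMap (fun vote => (PySem.Dict.ofList vote).keys)).filter (fun k => k ≠ "Precinct"))
  keys.map (fun k =>
    (k, (votes.filterMap (fun vote => ((PySem.Dict.ofList vote).get? k).map pvIntOf)).sum))

-- ===== PRECONDITION & SPEC =====
-- Pre_ excludes exactly the inputs where Python's int() raises ValueError: some
-- non-"Precinct" value of a vote is not an int-parsable string.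
def Pre_to_candidates (votes : List (List (String × String))) : Prop :=
  ∀ vote ∈ votes, ∀ p ∈ (PySem.Dict.ofList vote).items,
    p.1 ≠ "Precinct" → (PySem.Int.ofStr? p.2).isSome = true

instance (votes : List (List (String × String))) : Decidable (Pre_to_candidates votes) := by
  unfold Pre_to_candidates; infer_instance

def pvWitness_to_candidates : (List (List (String × String))) :=
  [[("Alice", "2")]]

def Spec_to_candidates (votes : List (List (String × String))) (out : List (String × Int)) : Prop := out = to_candidates_alt votes
instance (votes : List (List (String × String))) (out : List (String × Int)) : Decidable (Spec_to_candidates votes out) := by unfold Spec_to_candidates; infer_instance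

-- ===== CLAIM (what is proved, stated in full; the proofs are below) =====
def Claim_equal_to_candidates : Prop := ∀ (votes : List (List (String × String))), Dom_to_candidates votes → Pre_to_candidates votes → Spec_to_candidates votes (to_candidates votes)

-- ===== LEMMAS AND PROOFS =====

-- the normalised per-vote stream of (candidate, parsed value) pairs
def pvPairs (vote : List (String × String)) : List (String × Int) :=
  ((PySem.Dict.ofList vote).items.filter (fun p => p.1 ≠ "Precinct")).map
    (fun p => (p.1, pvIntOf p.2))

-- A's accumulation step, branches merged
def pvStep (c : PySem.Dict String Int) (p : String × Int) : PySem.Dict String Int :=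
  c.insert p.1 (c.getD p.1 0 + p.2)

theorem pv_step_branch (c : PySem.Dict String Int) (k : String) (v : Int) :
    (if c.contains k then c.insert k (c.getD k 0 + v) else c.insert k v) = pvStep c (k, v) := by
  cases h : c.contains k with
  | false => simp [pvStep, PySem.Dict.getD_of_not_contains c 0 h]
  | true => simp [pvStep]

theorem pv_inner_eq (vote : List (String × String)) (c : PySem.Dict String Int) :
    (PySem.Dict.ofList vote).keys.foldl (fun candidates key =>
        if key ≠ "Precinct" then
          if candidates.contains key then
            candidates.insert key (candidates.getD key 0 +
              pvIntOf ((PySem.Dict.ofList vote).getD key ""))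
          else
            candidates.insert key (pvIntOf ((PySem.Dict.ofList vote).getD key ""))
        else candidates) c
      = (pvPairs vote).foldl pvStep c := by
  set d := PySem.Dict.ofList vote with hd
  have hnd : d.keys.Nodup := PySem.Dict.nodup_keys_ofList vote
  have hitems : d.items = d.keys.map (fun k => (k, d.getD k "")) :=
    PySem.Dict.items_eq_map_keys d hnd ""
  rw [pvPairs, ← hd, hitems, List.filter_map, List.map_map, List.foldl_map]
  rw [List.foldl_filter]
  apply List.foldl_ext
  intro a x _
  simp only [Function.comp]
  by_cases hx : x ≠ "Precinct" <;> simp [hx, pv_step_branch]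

theorem pv_a_eq_fold (votes : List (List (String × String))) :
    to_candidates votes = ((votes.flatMap pvPairs).foldl pvStep PySem.Dict.empty).items := by
  rw [to_candidates, List.foldl_flatMap]
  congr 1
  apply List.foldl_ext
  intro c v _
  exact pv_inner_eq v c

theorem pv_getD_fold (l : List (String × Int)) (d : PySem.Dict String Int) (k : String) :
    (l.foldl pvStep d).getD k 0 = d.getD k 0 + ((l.filter (fun p => p.1 == k)).map (·.2)).sum := by
  induction l generalizing d with
  | nil => simp
  | cons p t ih =>
    simp only [List.foldl_cons, ih, pvStep, List.filter_cons]
    by_cases h : p.1 = k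
    · subst h; simp [PySem.Dict.getD_insert_self]; ring
    · rw [PySem.Dict.getD_insert]
      simp [Ne.symm h, h]

theorem pv_keys_fold (l : List (String × Int)) :
    (l.foldl pvStep PySem.Dict.empty).keys = PySem.Set.ofList (l.map Prod.fst) := by
  have := PySem.Dict.keys_foldl_insert_key (κ := String) (ν := Int) l Prod.fst
      (fun d p => d.getD p.1 0 + p.2) PySem.Dict.empty
  simpa [pvStep, PySem.Dict.keys_empty, PySem.Set.update_nil_left] using this

theorem pv_nodup_fold (l : List (String × Int)) : (l.foldl pvStep PySem.Dict.empty).keys.Nodup :=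
  PySem.Dict.nodup_keys_foldl_insert_key l Prod.fst (fun d p => d.getD p.1 0 + p.2) _
    PySem.Dict.nodup_keys_empty

theorem pv_filterMap_sum (l : List (List (String × String))) (g : List (String × String) → Option Int) :
    (l.filterMap g).sum = (l.map (fun x => (g x).getD 0)).sum := by
  induction l with
  | nil => rfl
  | cons x t ih =>
    cases h : g x <;> simp [h, ih]

theorem pv_zero (l : List (String × String)) (k : String) (h : k ∉ l.map Prod.fst) :
    ((l.filter (fun p => p.1 ≠ "Precinct")).map (fun p => (p.1, pvIntOf p.2))).filter
      (fun p => p.1 == k) = [] := by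
  apply List.filter_eq_nil_iff.mpr
  intro p hp
  obtain ⟨q, hq, rfl⟩ := List.mem_map.mp hp
  have hm : q.1 ∈ l.map Prod.fst := List.mem_map_of_mem (List.mem_of_mem_filter hq)
  intro e
  exact h (by rwa [(beq_iff_eq.mp e)] at hm)

theorem pv_col (l : List (String × String)) (hnd : (l.map Prod.fst).Nodup) (k : String)
    (hk : k ≠ "Precinct") :
    (((((l.filter (fun p => p.1 ≠ "Precinct")).map (fun p => (p.1, pvIntOf p.2))).filter
        (fun p => p.1 == k)).map (·.2)).sum : Int)
      = (((PySem.Dict.mk l).get? k).map pvIntOf).getD 0 := by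
  induction l with
  | nil => simp [PySem.Dict.get?]
  | cons q t ih =>
    obtain ⟨a, b⟩ := q
    simp only [List.map_cons, List.nodup_cons] at hnd
    obtain ⟨hna, hnt⟩ := hnd
    rw [PySem.Dict.get?_mk_cons]
    by_cases ha : a = k
    · subst ha
      rw [List.filter_cons, if_pos (by simp [hk]), List.map_cons, List.filter_cons,
        if_pos (by simp), List.map_cons, List.sum_cons, pv_zero t a hna]
      simp
    · rw [List.filter_cons]
      have hcase : (((if (decide ¬(a = "Precinct")) = true then
          (a, b) :: t.filter (fun p => p.1 ≠ "Precinct") else t.filter (fun p => p.1 ≠ "Precinct")).map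
          (fun p => (p.1, pvIntOf p.2))).filter (fun p => p.1 == k)) =
          ((t.filter (fun p => p.1 ≠ "Precinct")).map (fun p => (p.1, pvIntOf p.2))).filter
            (fun p => p.1 == k) := by
        split
        · rw [List.map_cons, List.filter_cons]
          simp [ha]
        · rfl
      rw [hcase, ih hnt]
      simp [ha]

theorem pv_pairs_fst (v : List (String × String)) :
    (pvPairs v).map Prod.fst
      = ((PySem.Dict.ofList v).keys).filter (fun k => k ≠ "Precinct") := by
  rw [pvPairs, List.map_map, show (PySem.Dict.ofList v).keys
      = (PySem.Dict.ofList v).items.map Prod.fst from rfl, List.filter_map]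
  rfl

theorem pv_colsum (votes : List (List (String × String))) (k : String) (hk : k ≠ "Precinct") :
    (((votes.flatMap pvPairs).filter (fun p => p.1 == k)).map (·.2)).sum
      = (votes.map (fun v => (((PySem.Dict.ofList v).get? k).map pvIntOf).getD 0)).sum := by
  induction votes with
  | nil => simp
  | cons v t ih =>
    rw [List.flatMap_cons, List.filter_append, List.map_append, List.sum_append, ih,
        List.map_cons, List.sum_cons]
    congr 1
    exact pv_col (PySem.Dict.ofList v).items (PySem.Dict.nodup_keys_ofList v) k hk

theorem pv_main (votes : List (List (String × String))) :
    to_candidates votes = to_candidates_alt votes := by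
  rw [pv_a_eq_fold, to_candidates_alt]
  rw [PySem.Dict.items_eq_map_keys _ (pv_nodup_fold (votes.flatMap pvPairs)) 0, pv_keys_fold]
  have hL : (votes.flatMap pvPairs).map Prod.fst
      = (votes.flatMap (fun v => (PySem.Dict.ofList v).keys)).filter (fun k => k ≠ "Precinct") := by
    rw [List.map_flatMap, List.filter_flatMap]
    simp only [pv_pairs_fst]
  rw [PySem.List.dedup_eq_ofList, ← hL]
  apply List.map_congr_left
  intro k hk
  have hk' : k ≠ "Precinct" := by
    have := (PySem.Set.mem_ofList ((votes.flatMap pvPairs).map Prod.fst) k).mp hk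
    rw [hL] at this
    simpa using (List.mem_filter.mp this).2
  rw [pv_getD_fold, PySem.Dict.getD_empty, zero_add, pv_colsum votes k hk',
      pv_filterMap_sum]

-- ===== VERDICT (by name: the statement is the Claim_ definition above) =====
theorem to_candidates_spec : Claim_equal_to_candidates := by
  intro votes _ _
  exact pv_main votes
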